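-- pv_equiv track=rewrite | github.com/obophenotype/ABA_Uberon | src/scripts/mapping_report.py | generate_path_query
-- ===== SOURCE A (Python) =====
-- def generate_path_query(i):
--     """
--     Dynamically generating fixed length super class queries such as:
--         <entity_name> rdfs: subClassOf / owl:someValuesFrom ?p1.
--         FILTER(strstarts(str(?p1), str(MBA:)) )
--         ?p1 rdfs: subClassOf / owl:someValuesFrom ?parentClass.
--         FILTER(strstarts(str(?parentClass), str(MBA:)) )
--
--     Params:
--         i: depth of Uberon parent to search
--     Returns: fixed length parent query section.
--     """
--     query_mid = ""
--     for j in range(i + 1):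
--         s_name = "?p" + str(j)
--         o_name = "?p" + str(j + 1)
--
--         if j == 0:
--             s_name = "<entity_name>"
--         if j == i:
--             o_name = "?parentClass"
--
--         query_mid += """
--                     {} rdfs:subClassOf/owl:someValuesFrom {} .
--                     FILTER( strstarts(str({}),str(MBA:)) )
--                     """.format(s_name, o_name, o_name)
--     return query_mid
-- ===== SOURCE B (Python) =====
-- def generate_path_query(i):
--     """Back-to-front: walk j from i down to 0, threading each row's subject name
--     backwards as the next-lower row's object, collect the blocks and join them in
--     reverse; no j==i boundary check and no forward string accumulation."""
--     BLOCK = """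
--                     {} rdfs:subClassOf/owl:someValuesFrom {} .
--                     FILTER( strstarts(str({}),str(MBA:)) )
--                     """
--     parts = []
--     obj = "?parentClass"
--     j = i
--     while j >= 0:
--         subj = "<entity_name>" if j == 0 else "?p" + str(j)
--         parts.append(BLOCK.format(subj, obj, obj))
--         obj = subj
--         j -= 1
--     return "".join(reversed(parts))
-- ===== Notes on version B (the rewrite author's own statement) =====
-- stated objective: alternative
-- what changed: B builds the query back-to-front, walking the depth index downwards and threading each row's subject name backwards as the lower row's object, collecting blocks in a list joined in reverse, instead of A's forward loop with first/last-row boundary branches and string accumulation.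
import Mathlib
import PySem

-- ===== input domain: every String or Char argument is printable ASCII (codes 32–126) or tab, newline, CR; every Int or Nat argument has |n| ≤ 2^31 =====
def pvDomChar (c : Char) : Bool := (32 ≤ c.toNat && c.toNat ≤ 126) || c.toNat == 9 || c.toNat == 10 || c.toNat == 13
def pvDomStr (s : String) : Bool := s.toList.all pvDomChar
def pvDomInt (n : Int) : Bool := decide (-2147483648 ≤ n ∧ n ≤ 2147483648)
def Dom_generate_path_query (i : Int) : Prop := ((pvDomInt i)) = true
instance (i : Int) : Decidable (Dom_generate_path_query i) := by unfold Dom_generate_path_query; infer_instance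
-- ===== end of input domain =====

-- B builds the query back-to-front (j from i down to 0), threading each row's subject name backwards as the lower row's object (alternative decomposition; same output).

-- the triple-quoted template with its three slots (slots 2 and 3 receive the same string)
def pvFmt (s o : String) : String :=
  "\n                    " ++ s ++ " rdfs:subClassOf/owl:someValuesFrom " ++ o ++
  " .\n                    FILTER( strstarts(str(" ++ o ++ "),str(MBA:)) )\n                    "

-- ===== PORT A =====
def generate_path_query (i : Int) : String :=
  (PySem.List.pyRange 0 (i + 1) 1).foldl (fun query_mid j =>
    let s_name := "?p" ++ PySem.Int.toStr j
    let o_name := "?p" ++ PySem.Int.toStr (j + 1)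
    let s_name := if j == 0 then "<entity_name>" else s_name
    let o_name := if j == i then "?parentClass" else o_name
    query_mid ++ pvFmt s_name o_name) ""

-- ===== PORT B =====
-- the backward while loop: j counts down from i to 0, obj is the current row's object
-- name, parts collects the formatted blocks (Python's j ≥ 0 region as a Nat)
def pvRowsB : Nat → String → List String → List String
  | 0, obj, parts => parts ++ [pvFmt "<entity_name>" obj]
  | n + 1, obj, parts =>
    let subj := "?p" ++ PySem.Int.toStr ((n : Int) + 1)
    pvRowsB n subj (parts ++ [pvFmt subj obj])

def generate_path_query_alt (i : Int) : String :=
  if 0 ≤ i then PySem.Str.join "" (pvRowsB i.toNat "?parentClass" []).reverse else ""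

-- ===== PRECONDITION & SPEC =====
def Spec_generate_path_query (i : Int) (out : String) : Prop := out = generate_path_query_alt i
instance (i : Int) (out : String) : Decidable (Spec_generate_path_query i out) := by unfold Spec_generate_path_query; infer_instance

-- ===== CLAIM (what is proved, stated in full; the proofs are below) =====
def Claim_equal_generate_path_query : Prop := ∀ (i : Int), Dom_generate_path_query i → Spec_generate_path_query i (generate_path_query i)

-- ===== LEMMAS AND PROOFS =====

-- common description of one block chain, by recursion on the depth
def pvSName (j : Int) : String := if j = 0 then "<entity_name>" else "?p" ++ PySem.Int.toStr j

def pvMid : Nat → String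
  | 0 => ""
  | n + 1 => pvMid n ++ pvFmt (pvSName n) ("?p" ++ PySem.Int.toStr ((n : Int) + 1))

-- A's loop over the non-final rows, with the final index i still out of reach
lemma loopA_prefix (n : Nat) (i : Int) (hni : (n : Int) ≤ i) (acc : String) :
    (PySem.List.pyRange 0 n 1).foldl (fun query_mid j =>
      let s_name := "?p" ++ PySem.Int.toStr j
      let o_name := "?p" ++ PySem.Int.toStr (j + 1)
      let s_name := if j == 0 then "<entity_name>" else s_name
      let o_name := if j == i then "?parentClass" else o_name
      query_mid ++ pvFmt s_name o_name) acc = acc ++ pvMid n := by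
  induction n generalizing acc with
  | zero => simp [PySem.List.pyRange_one_eq_nil (by omega : (0:Int) ≤ 0), pvMid]
  | succ m ih =>
    rw [show (((m + 1 : Nat) : Int)) = (m : Int) + 1 by push_cast; ring]
    rw [PySem.List.pyRange_one_succ_right (by omega : (0:Int) ≤ (m : Int)), List.foldl_append]
    rw [ih (by omega)]
    simp only [List.foldl_cons, List.foldl_nil]
    have hne : ((m : Int) == i) = false := by
      rw [beq_eq_false_iff_ne]; omega
    have hmid : pvMid (m + 1) = pvMid m ++ pvFmt (pvSName m) ("?p" ++ PySem.Int.toStr ((m : Int) + 1)) := rfl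
    by_cases h : (m : Int) = 0
    · simp [h, hmid, pvSName, String.append_assoc, show ¬((0:Int) = i) by omega]
    · simp [hne, hmid, pvSName, String.append_assoc]

lemma A_eq (n : Nat) :
    generate_path_query (n : Int) = pvMid n ++ pvFmt (pvSName n) "?parentClass" := by
  unfold generate_path_query
  rw [PySem.List.pyRange_one_succ_right (by omega : (0:Int) ≤ (n : Int)), List.foldl_append]
  rw [loopA_prefix n n le_rfl ""]
  simp only [List.foldl_cons, List.foldl_nil, beq_self_eq_true, if_true]
  by_cases h : (n : Int) = 0 <;> simp [h, pvSName]

-- join with the empty separator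
lemma join_empty_nil : PySem.Str.join "" ([] : List String) = "" := by
  apply String.toList_inj.mp
  simp [PySem.Str.toList_join, PySem.Chars.join_nil]

lemma join_empty_cons (x : String) (xs : List String) :
    PySem.Str.join "" (x :: xs) = x ++ PySem.Str.join "" xs := by
  apply String.toList_inj.mp
  cases xs <;> simp [PySem.Str.toList_join, PySem.Chars.join_cons_cons, PySem.Chars.join_nil]

-- B's backward loop produces the same chain, for any final object name z and accumulator
lemma rowsB_eq (n : Nat) (z : String) (acc : List String) :
    PySem.Str.join "" (pvRowsB n z acc).reverse
      = (pvMid n ++ pvFmt (pvSName n) z) ++ PySem.Str.join "" acc.reverse := by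
  induction n generalizing z acc with
  | zero =>
    simp only [pvRowsB, List.reverse_append, List.reverse_cons, List.reverse_nil,
      List.nil_append, List.singleton_append, join_empty_cons]
    simp [pvMid, pvSName]
  | succ m ih =>
    have hs : pvSName (((m + 1 : Nat) : Int)) = "?p" ++ PySem.Int.toStr ((m : Int) + 1) := by
      simp [pvSName, show (((m + 1 : Nat) : Int)) = (m : Int) + 1 by push_cast; ring,
        show ¬((m : Int) + 1 = 0) by omega]
    simp only [pvRowsB, ih]
    simp only [List.reverse_append, List.reverse_cons, List.reverse_nil, List.nil_append,
      List.singleton_append, join_empty_cons]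
    rw [hs]
    show pvMid m ++ pvFmt (pvSName m) ("?p" ++ PySem.Int.toStr ((m : Int) + 1)) ++ _ = _
    have : pvMid (m + 1) = pvMid m ++ pvFmt (pvSName m) ("?p" ++ PySem.Int.toStr ((m : Int) + 1)) := rfl
    rw [this]
    simp [String.append_assoc]

lemma B_eq (n : Nat) :
    generate_path_query_alt (n : Int) = pvMid n ++ pvFmt (pvSName n) "?parentClass" := by
  unfold generate_path_query_alt
  rw [if_pos (by omega : (0:Int) ≤ (n : Int))]
  simpa [join_empty_nil] using rowsB_eq n "?parentClass" []

lemma neg_eq (i : Int) (h : i < 0) : generate_path_query i = generate_path_query_alt i := by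
  unfold generate_path_query generate_path_query_alt
  rw [PySem.List.pyRange_one_eq_nil (by omega : i + 1 ≤ 0), if_neg (by omega)]
  simp

-- ===== VERDICT (by name: the statement is the Claim_ definition above) =====
theorem generate_path_query_spec : Claim_equal_generate_path_query := by
  intro i _
  unfold Spec_generate_path_query
  rcases lt_or_ge i 0 with h | h
  · exact neg_eq i h
  · obtain ⟨n, rfl⟩ : ∃ n : Nat, i = (n : Int) := ⟨i.toNat, by omega⟩
    rw [A_eq n, B_eq n]
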